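-- pv_equiv track=rewrite | github.com/chanzuckerberg/single-cell-data-portal | dcp_prototype/backend/wrangling/migrations/scripts/migrator_json_to_tsv.py | order_file_list
-- ===== SOURCE A (Python) =====
-- def order_file_list(file_list):
--     ordered_file_list = []
--
--     for file in file_list:
--         if "donor_organism" in file:
--             ordered_file_list.append(file)
--     for file in file_list:
--         if "specimen" in file:
--             ordered_file_list.append(file)
--     for file in file_list:
--         if "cell_suspension" in file:
--             ordered_file_list.append(file)
--     for file in file_list:
--         if file not in ordered_file_list:
--             ordered_file_list.append(file)
--
--     return ordered_file_list
-- ===== SOURCE B (Python) =====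
-- def order_file_list(file_list):
--     donor, specimen, cell, rest = [], [], [], []
--     seen = set()
--     for f in file_list:
--         hit = False
--         if "donor_organism" in f:
--             donor.append(f)
--             hit = True
--         if "specimen" in f:
--             specimen.append(f)
--             hit = True
--         if "cell_suspension" in f:
--             cell.append(f)
--             hit = True
--         if not hit and f not in seen:
--             rest.append(f)
--             seen.add(f)
--     return donor + specimen + cell + rest
-- ===== Notes on version B (the rewrite author's own statement) =====
-- stated objective: faster
-- what changed: A's four separate scans over file_list (the last doing an O(n) membership test against the growing result) are replaced by a single partition pass that appends each file to donor/specimen/cell buckets and, when no category matches, to a deduplicated rest bucket guarded by a hash set; the result is the concatenation of the four buckets.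
import Mathlib
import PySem

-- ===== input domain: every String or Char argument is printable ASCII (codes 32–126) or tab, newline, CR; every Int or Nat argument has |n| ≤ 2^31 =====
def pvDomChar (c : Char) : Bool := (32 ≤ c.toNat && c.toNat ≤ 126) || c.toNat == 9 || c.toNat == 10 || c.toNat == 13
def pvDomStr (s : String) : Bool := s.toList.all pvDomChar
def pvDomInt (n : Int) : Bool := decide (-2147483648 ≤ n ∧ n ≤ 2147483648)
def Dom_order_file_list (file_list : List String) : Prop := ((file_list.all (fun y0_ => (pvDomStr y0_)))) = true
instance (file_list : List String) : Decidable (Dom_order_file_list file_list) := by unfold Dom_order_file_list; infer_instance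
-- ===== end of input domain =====

-- B replaces A's four scans over file_list (the last scanning the growing result for
-- membership) by one partition pass keeping four buckets and a seen-set.

-- ===== PORT A =====
def order_file_list (file_list : List String) : List String :=
  let o1 := file_list.foldl
    (fun acc f => if PySem.Str.isIn "donor_organism" f then acc ++ [f] else acc) []
  let o2 := file_list.foldl
    (fun acc f => if PySem.Str.isIn "specimen" f then acc ++ [f] else acc) o1
  let o3 := file_list.foldl
    (fun acc f => if PySem.Str.isIn "cell_suspension" f then acc ++ [f] else acc) o2
  file_list.foldl (fun acc f => if f ∈ acc then acc else acc ++ [f]) o3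

-- ===== PORT B =====
-- state: (donor, specimen, cell, rest, seen)
def pvBStep (st : List String × List String × List String × List String × PySem.Set String)
    (f : String) :
    List String × List String × List String × List String × PySem.Set String :=
  let (donor, specimen, cell, rest, seen) := st
  let hit1 := PySem.Str.isIn "donor_organism" f
  let donor' := if hit1 then donor ++ [f] else donor
  let hit2 := PySem.Str.isIn "specimen" f
  let specimen' := if hit2 then specimen ++ [f] else specimen
  let hit3 := PySem.Str.isIn "cell_suspension" f
  let cell' := if hit3 then cell ++ [f] else cell
  let hit := hit1 || hit2 || hit3
  if !hit && !(PySem.Set.contains seen f) then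
    (donor', specimen', cell', rest ++ [f], PySem.Set.add seen f)
  else
    (donor', specimen', cell', rest, seen)

def order_file_list_alt (file_list : List String) : List String :=
  let st := file_list.foldl pvBStep ([], [], [], [], PySem.Set.empty)
  st.1 ++ (st.2.1 ++ (st.2.2.1 ++ st.2.2.2.1))

-- ===== PRECONDITION & SPEC =====
def Spec_order_file_list (file_list : List String) (out : List String) : Prop := out = order_file_list_alt file_list
instance (file_list : List String) (out : List String) : Decidable (Spec_order_file_list file_list out) := by unfold Spec_order_file_list; infer_instance

-- ===== CLAIM (what is proved, stated in full; the proofs are below) =====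
def Claim_equal_order_file_list : Prop := ∀ (file_list : List String), Dom_order_file_list file_list → Spec_order_file_list file_list (order_file_list file_list)

-- ===== LEMMAS AND PROOFS =====

def pvHit (f : String) : Bool :=
  PySem.Str.isIn "donor_organism" f || PySem.Str.isIn "specimen" f ||
  PySem.Str.isIn "cell_suspension" f

-- the deduplicating "rest" loop both programs share, abstractly
def pvRestStep (r : List String) (f : String) : List String :=
  if pvHit f = false ∧ f ∉ r then r ++ [f] else r

-- A's fourth loop, started on C ++ r with C holding exactly the hit elements seen by
-- the loop, only ever appends to the r part
theorem pvA4 (C : List String) (hC : ∀ x, x ∈ C → pvHit x = true)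
    (l' : List String) (hsub : ∀ x, x ∈ l' → pvHit x = true → x ∈ C) (r : List String) :
    l'.foldl (fun acc f => if f ∈ acc then acc else acc ++ [f]) (C ++ r)
      = C ++ l'.foldl pvRestStep r := by
  induction l' generalizing r with
  | nil => rfl
  | cons f t ih =>
    simp only [List.foldl_cons]
    have htail : ∀ x, x ∈ t → pvHit x = true → x ∈ C :=
      fun x hx => hsub x (by simp [hx])
    by_cases hh : pvHit f = true
    · rw [if_pos (List.mem_append_left _ (hsub f (by simp) hh))]
      have hstep : pvRestStep r f = r := by simp [pvRestStep, hh]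
      rw [hstep]; exact ih htail r
    · have hfC : f ∉ C := fun hf => hh (hC f hf)
      by_cases hr : f ∈ r
      · rw [if_pos (List.mem_append_right _ hr)]
        have hstep : pvRestStep r f = r := by simp [pvRestStep, hr]
        rw [hstep]; exact ih htail r
      · have hnot : f ∉ C ++ r := by
          intro h; rcases List.mem_append.1 h with h | h
          · exact hfC h
          · exact hr h
        rw [if_neg hnot]
        have hstep : pvRestStep r f = r ++ [f] := by
          simp [pvRestStep, hr, eq_false_of_ne_true hh]
        rw [hstep, List.append_assoc]
        exact ih htail (r ++ [f])

-- B's single pass: the three category buckets are filters, the rest bucket runs the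
-- shared dedup loop, as long as the seen-set stores exactly the rest bucket's members
theorem pvB (l' : List String) (dA sA cA r : List String) (seen : PySem.Set String)
    (hseen : ∀ x, x ∈ seen ↔ x ∈ r) :
    (l'.foldl pvBStep (dA, sA, cA, r, seen)).1
        = dA ++ l'.filter (fun f => PySem.Str.isIn "donor_organism" f)
    ∧ (l'.foldl pvBStep (dA, sA, cA, r, seen)).2.1
        = sA ++ l'.filter (fun f => PySem.Str.isIn "specimen" f)
    ∧ (l'.foldl pvBStep (dA, sA, cA, r, seen)).2.2.1
        = cA ++ l'.filter (fun f => PySem.Str.isIn "cell_suspension" f)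
    ∧ (l'.foldl pvBStep (dA, sA, cA, r, seen)).2.2.2.1
        = l'.foldl pvRestStep r := by
  induction l' generalizing dA sA cA r seen with
  | nil => simp
  | cons f t ih =>
    have hcontains : PySem.Set.contains seen f = decide (f ∈ r) := by
      by_cases h : f ∈ r <;> simp [hseen, h]
    simp only [List.foldl_cons, List.filter_cons]
    by_cases hh : pvHit f = true
    · have hstep : pvBStep (dA, sA, cA, r, seen) f
          = ((if PySem.Str.isIn "donor_organism" f then dA ++ [f] else dA),
             (if PySem.Str.isIn "specimen" f then sA ++ [f] else sA),
             (if PySem.Str.isIn "cell_suspension" f then cA ++ [f] else cA),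
             r, seen) := by
        simp only [pvBStep]
        rw [show (PySem.Str.isIn "donor_organism" f || PySem.Str.isIn "specimen" f
              || PySem.Str.isIn "cell_suspension" f) = pvHit f from rfl, hh]
        simp only [Bool.not_true, Bool.false_and, Bool.false_eq_true, if_false]
      have hrest : pvRestStep r f = r := by simp [pvRestStep, hh]
      rw [hstep, hrest]
      rcases ih _ _ _ _ _ hseen with ⟨h1, h2, h3, h4⟩
      refine ⟨?_, ?_, ?_, h4⟩
      · rw [h1]; split <;> simp
      · rw [h2]; split <;> simp
      · rw [h3]; split <;> simp
    · have hh3 : pvHit f = false := eq_false_of_ne_true hh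
      have hparts := hh3
      simp only [pvHit, Bool.or_eq_false_iff] at hparts
      obtain ⟨⟨hd, hs⟩, hc⟩ := hparts
      by_cases hr : f ∈ r
      · have hstep : pvBStep (dA, sA, cA, r, seen) f = (dA, sA, cA, r, seen) := by
          simp only [pvBStep, hd, hs, hc, hcontains]
          simp only [hr, decide_true, Bool.not_true, Bool.and_false, Bool.false_eq_true,
            if_false]
        have hrest : pvRestStep r f = r := by simp [pvRestStep, hr]
        rw [hstep, hrest, hd, hs, hc]
        simp only [if_false, Bool.false_eq_true]
        exact ih _ _ _ _ _ hseen
      · have hstep : pvBStep (dA, sA, cA, r, seen) f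
            = (dA, sA, cA, r ++ [f], PySem.Set.add seen f) := by
          simp only [pvBStep, hd, hs, hc, hcontains]
          simp only [hr, decide_false, Bool.not_false, Bool.or_self, Bool.and_true,
            Bool.not_true, Bool.false_eq_true, if_false, Bool.or_false, if_true,
            Bool.true_eq_false, Bool.not_eq_true]
        have hrest : pvRestStep r f = r ++ [f] := by simp [pvRestStep, hr, hh3]
        have hseen' : ∀ x, x ∈ PySem.Set.add seen f ↔ x ∈ r ++ [f] := by
          intro x
          rw [PySem.Set.mem_add, List.mem_append, List.mem_singleton, hseen x]
        rw [hstep, hrest, hd, hs, hc]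
        simp only [if_false, Bool.false_eq_true]
        exact ih _ _ _ _ _ hseen'

-- ===== VERDICT (by name: the statement is the Claim_ definition above) =====
theorem order_file_list_spec : Claim_equal_order_file_list := by
  intro l _
  unfold Spec_order_file_list order_file_list order_file_list_alt
  simp only [PySem.List.foldl_append_if_eq_filter, List.nil_append]
  have hC : ∀ x, x ∈ l.filter (fun f => PySem.Str.isIn "donor_organism" f)
      ++ l.filter (fun f => PySem.Str.isIn "specimen" f)
      ++ l.filter (fun f => PySem.Str.isIn "cell_suspension" f) → pvHit x = true := by
    intro x hx
    simp only [List.mem_append, List.mem_filter] at hx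
    simp only [pvHit, Bool.or_eq_true]
    rcases hx with (⟨_, h⟩ | ⟨_, h⟩) | ⟨_, h⟩
    · exact Or.inl (Or.inl h)
    · exact Or.inl (Or.inr h)
    · exact Or.inr h
  have hsub : ∀ x, x ∈ l → pvHit x = true
      → x ∈ l.filter (fun f => PySem.Str.isIn "donor_organism" f)
        ++ l.filter (fun f => PySem.Str.isIn "specimen" f)
        ++ l.filter (fun f => PySem.Str.isIn "cell_suspension" f) := by
    intro x hx hh
    simp only [pvHit, Bool.or_eq_true] at hh
    simp only [List.mem_append, List.mem_filter]
    rcases hh with (h | h) | h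
    · exact Or.inl (Or.inl ⟨hx, h⟩)
    · exact Or.inl (Or.inr ⟨hx, h⟩)
    · exact Or.inr ⟨hx, h⟩
  have hA := pvA4 _ hC l hsub []
  rw [List.append_nil] at hA
  rw [hA]
  have hseen0 : ∀ x : String, x ∈ (PySem.Set.empty : PySem.Set String) ↔ x ∈ ([] : List String) := by
    intro x
    simp [PySem.Set.empty]
  rcases pvB l [] [] [] [] PySem.Set.empty hseen0 with ⟨h1, h2, h3, h4⟩
  rw [h1, h2, h3, h4]
  simp only [List.nil_append, List.append_assoc]
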